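-- pv_equiv track=rewrite | github.com/DanielJuravski/deepsy | TM/pre_process/wordsStat.py | makeStat
-- ===== SOURCE A (Python) =====
-- def makeStat(document_content, stop_words):
--     dropped_words = []
--     passed_words = []
--
--     for word in document_content:
--         if word in stop_words:
--             dropped_words.append(word)
--         else:
--             passed_words.append(word)
--
--     num_document_words = len(document_content)
--     num_unique_document_words = len(set(document_content))
--     num_dropped_words = len(dropped_words)
--     num_unique_dropped_words = len(set(dropped_words))
--     num_passed_words = len(passed_words)
--     num_unique_passed_words = len(set(passed_words))
--
--     stats = {}
--     stats['num_document_words'] = num_document_words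
--     stats['num_unique_document_words'] = num_unique_document_words
--     stats['num_dropped_words'] = num_dropped_words
--     stats['num_unique_dropped_words'] = num_unique_dropped_words
--     stats['num_passed_words'] = num_passed_words
--     stats['num_unique_passed_words'] = num_unique_passed_words
--
--     return stats
-- ===== SOURCE B (Python) =====
-- def makeStat(document_content, stop_words):
--     # Frequency-table approach: build word->count map once, then derive all six
--     # stats from it; the passed side is obtained by subtraction, never iterated.
--     stop = set(stop_words)
--     freq = {}
--     for w in document_content:
--         freq[w] = freq.get(w, 0) + 1
--     n = sum(freq.values())
--     u = len(freq)
--     nd = sum(c for w, c in freq.items() if w in stop)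
--     ud = sum(1 for w in freq if w in stop)
--     return {
--         'num_document_words': n,
--         'num_unique_document_words': u,
--         'num_dropped_words': nd,
--         'num_unique_dropped_words': ud,
--         'num_passed_words': n - nd,
--         'num_unique_passed_words': u - ud,
--     }
-- ===== Notes on version B (the rewrite author's own statement) =====
-- stated objective: alternative
-- what changed: B builds one word->frequency dict, derives totals and the dropped side by iterating the distinct words of that table, and obtains the passed side purely by subtraction (n - nd, u - ud), instead of A's partition into two word lists followed by three set() re-scans.
import Mathlib
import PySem

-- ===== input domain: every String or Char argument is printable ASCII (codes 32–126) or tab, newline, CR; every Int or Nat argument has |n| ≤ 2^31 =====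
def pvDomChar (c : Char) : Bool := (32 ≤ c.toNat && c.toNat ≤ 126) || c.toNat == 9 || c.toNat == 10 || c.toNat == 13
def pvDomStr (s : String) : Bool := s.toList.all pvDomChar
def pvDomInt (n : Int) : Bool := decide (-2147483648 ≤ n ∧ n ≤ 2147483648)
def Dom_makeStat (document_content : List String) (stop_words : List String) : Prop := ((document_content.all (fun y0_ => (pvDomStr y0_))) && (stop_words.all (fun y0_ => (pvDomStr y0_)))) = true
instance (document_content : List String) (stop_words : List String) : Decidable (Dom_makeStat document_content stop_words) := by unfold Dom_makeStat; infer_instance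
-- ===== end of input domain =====

-- B replaces A's partition-into-lists-then-rescan by a frequency table built once, deriving the passed side by subtraction; objective: alternative decomposition.

-- ===== PORT A =====
-- loop body of 'for word in document_content: append to dropped_words or passed_words'
def aStep (stop_words : List String) (acc : List String × List String) (word : String) :
    List String × List String :=
  if stop_words.contains word then (acc.1 ++ [word], acc.2) else (acc.1, acc.2 ++ [word])

def makeStat (document_content : List String) (stop_words : List String) : List (String × Int) :=
  let dp := document_content.foldl (aStep stop_words) ([], [])
  let dropped_words := dp.1
  let passed_words := dp.2
  let num_document_words : Int := document_content.length
  let num_unique_document_words : Int := (PySem.Set.ofList document_content).length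
  let num_dropped_words : Int := dropped_words.length
  let num_unique_dropped_words : Int := (PySem.Set.ofList dropped_words).length
  let num_passed_words : Int := passed_words.length
  let num_unique_passed_words : Int := (PySem.Set.ofList passed_words).length
  let stats : PySem.Dict String Int := PySem.Dict.empty
  let stats := stats.insert "num_document_words" num_document_words
  let stats := stats.insert "num_unique_document_words" num_unique_document_words
  let stats := stats.insert "num_dropped_words" num_dropped_words
  let stats := stats.insert "num_unique_dropped_words" num_unique_dropped_words
  let stats := stats.insert "num_passed_words" num_passed_words
  let stats := stats.insert "num_unique_passed_words" num_unique_passed_words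
  stats.items

-- ===== PORT B =====
def makeStat_alt (document_content : List String) (stop_words : List String) : List (String × Int) :=
  let stop : PySem.Set String := PySem.Set.ofList stop_words
  -- freq[w] = freq.get(w, 0) + 1 over the document
  let freq : PySem.Dict String Int :=
    document_content.foldl (fun d w => d.insert w (d.getD w 0 + 1)) PySem.Dict.empty
  let n : Int := freq.values.sum
  let u : Int := freq.size
  -- sum(c for w, c in freq.items() if w in stop)
  let nd : Int := ((freq.items.filter (fun p => stop.contains p.1)).map (fun p => p.2)).sum
  -- sum(1 for w in freq if w in stop)
  let ud : Int := ((freq.keys.filter (fun w => stop.contains w)).length : Int)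
  [("num_document_words", n),
   ("num_unique_document_words", u),
   ("num_dropped_words", nd),
   ("num_unique_dropped_words", ud),
   ("num_passed_words", n - nd),
   ("num_unique_passed_words", u - ud)]

-- ===== PRECONDITION & SPEC =====
def Spec_makeStat (document_content : List String) (stop_words : List String) (out : List (String × Int)) : Prop := out = makeStat_alt document_content stop_words
instance (document_content : List String) (stop_words : List String) (out : List (String × Int)) : Decidable (Spec_makeStat document_content stop_words out) := by unfold Spec_makeStat; infer_instance

-- ===== CLAIM =====
def Claim_equal_makeStat : Prop := ∀ (document_content : List String) (stop_words : List String), Dom_makeStat document_content stop_words → Spec_makeStat document_content stop_words (makeStat document_content stop_words)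

-- ===== LEMMAS AND PROOFS =====

-- A's loop builds exactly the filtered lists.
theorem a_fold_eq (stop : List String) (xs : List String) (d p : List String) :
    xs.foldl (aStep stop) (d, p)
    = (d ++ xs.filter (fun w => stop.contains w), p ++ xs.filter (fun w => !stop.contains w)) := by
  induction xs generalizing d p with
  | nil => simp
  | cons x xs ih =>
    by_cases h : x ∈ stop <;> simp [aStep, h, ih]

-- set(xs) of a one-longer list.
theorem ofList_append_singleton (xs : List String) (a : String) :
    PySem.Set.ofList (xs ++ [a]) = PySem.Set.add (PySem.Set.ofList xs) a := by
  simp [PySem.Set.ofList_eq_foldl, List.foldl_append]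

-- dedup commutes with filter (first occurrences are preserved).
theorem ofList_filter (p : String → Bool) (xs : List String) :
    PySem.Set.ofList (xs.filter p) = (PySem.Set.ofList xs).filter p := by
  induction xs using List.reverseRecOn with
  | nil => simp [PySem.Set.ofList]
  | append_singleton xs a ih =>
    rw [List.filter_append]
    by_cases hp : p a <;> by_cases hm : a ∈ xs <;>
      simp [hp, hm, ofList_append_singleton, PySem.Set.add, PySem.Set.contains,
        PySem.Set.mem_ofList, List.filter_append, List.mem_filter, ih]

-- Σ over the distinct elements satisfying p of their multiplicities = length of the filtered list.
theorem sum_count_filter (p : String → Bool) (xs : List String) :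
    (((PySem.Set.ofList xs).filter p).map (fun k => (xs.count k : Int))).sum
      = ((xs.filter p).length : Int) := by
  have hperm : (PySem.Set.ofList xs).Perm xs.dedup :=
    (List.perm_ext_iff_of_nodup (PySem.Set.nodup_ofList xs) xs.nodup_dedup).2
      (fun a => by simp [PySem.Set.mem_ofList, List.mem_dedup])
  rw [(((hperm.filter p).map (fun k => (xs.count k : Int)))).sum_eq]
  have h3 : ((xs.dedup.filter p).map (fun k => (xs.count k : Int))).sum
      = (((xs.dedup.filter p).map (fun x => xs.count x)).sum : Int) := by
    simp [Function.comp_def]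
  rw [h3, List.sum_map_count_dedup_filter_eq_countP p xs, List.countP_eq_length_filter]

-- a filter and its complement split the length.
theorem length_filter_split (p : String → Bool) (xs : List String) :
    (xs.filter p).length + (xs.filter (fun a => !p a)).length = xs.length := by
  induction xs with
  | nil => simp
  | cons a t ih => by_cases h : p a <;> simp [h] <;> omega

-- membership test against a set literal equals the list test.
theorem contains_ofList_eq (stop : List String) (w : String) :
    (PySem.Set.ofList stop).contains w = stop.contains w := by
  by_cases h : w ∈ stop <;> simp [PySem.Set.mem_ofList, h]

-- ===== VERDICT =====
theorem makeStat_spec : Claim_equal_makeStat := by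
  intro doc stop _
  show makeStat doc stop = makeStat_alt doc stop
  unfold makeStat makeStat_alt
  rw [PySem.Dict.foldl_insert_getD_add_one_eq_counter]
  simp only [a_fold_eq, List.nil_append, PySem.Dict.values, PySem.Dict.size,
    PySem.Dict.keys, PySem.Dict.items_counter, contains_ofList_eq,
    List.filter_map, List.map_map, Function.comp_def]
  have hn : ((PySem.Set.ofList doc).map (fun x => ((doc.count x : Int)))).sum = (doc.length : Int) := by
    simpa using sum_count_filter (fun _ => true) doc
  have hnd := sum_count_filter (fun w => decide (w ∈ stop)) doc
  have hsplit := length_filter_split (fun w => decide (w ∈ stop)) doc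
  have hssplit := length_filter_split (fun w => decide (w ∈ stop)) (PySem.Set.ofList doc)
  simp [PySem.Dict.insert, PySem.Dict.empty, PySem.Dict.contains,
    ofList_filter, hn]
  refine ⟨hnd.symm, ?_, ?_⟩
  · rw [hnd]; omega
  · omega
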